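-- pv_equiv track=rewrite | github.com/SiChengWong/jpeg-compatible-compression-and-encryption | encrypt.py | separateSegment
-- ===== SOURCE A (Python) =====
-- def remove0xFF00(l):
--     """
--     Removes 0x00 after 0xff in the image scan section of JPEG
--     :param l: list to be removed 0xFF00
--     :return: list after removing 0xFF00
--     """
--     l_without_0xFF00 = [l[0]]
--     for i in range(1, len(l)):
--         if l[i] == 0x00:
--             if l[i - 1] != 0xFF:
--                 l_without_0xFF00.append(l[i])
--         else:
--             l_without_0xFF00.append(l[i])
--     return l_without_0xFF00
--
-- def byteListToInt(l):
--     """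
--     convert list of integer ranging from 0 to 255 into integer
--     :param l: list
--     :return: result
--     """
--     res = 0
--     byte_list = bytes(l)
--     for i in range(len(byte_list)):
--         res = (res << 8) + byte_list[i]
--     return res
--
-- def separateSegment(data):
--     """
--     separate segments according to markers starting with 0xFF
--     """
--     # list of markers' indices in self.data
--     marker_pos = []
--     for i in range(1, len(data)):
--         if data[i - 1] == 0xFF and data[i] != 0x00:
--             # find a marker
--             marker_pos.append(i - 1)
--     marker_pos.append(len(data))
--     # list of segments
--     segments = {}
--     for i in range(len(marker_pos) - 1):
--         marker = byteListToInt(data[marker_pos[i]: marker_pos[i] + 2])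
--         if marker not in segments:
--             segments[marker] = []
--         segments[marker].append(remove0xFF00(data[marker_pos[i]: marker_pos[i + 1]]))
--     return segments
-- ===== SOURCE B (Python) =====
-- def _closeSegment(segments, data, start, end):
--     key = data[start] * 256 + data[start + 1]
--     seg = data[start:end]
--     cleaned = [seg[0]]
--     for prev, cur in zip(seg, seg[1:]):
--         if cur != 0x00 or prev != 0xFF:
--             cleaned.append(cur)
--     segments[key] = segments.get(key, []) + [cleaned]
--
-- def separateSegment(data):
--     """Single streaming pass: close each segment when the next marker begins."""
--     segments = {}
--     start = -1
--     for i in range(1, len(data)):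
--         if data[i - 1] == 0xFF and data[i] != 0x00:
--             if start >= 0:
--                 _closeSegment(segments, data, start, i - 1)
--             start = i - 1
--     if start >= 0:
--         _closeSegment(segments, data, start, len(data))
--     return segments
-- ===== Notes on version B (the rewrite author's own statement) =====
-- stated objective: alternative
-- what changed: B replaces A's two-phase design (collect all marker indices into a list, then index consecutive pairs to slice and clean each segment) by a single streaming pass that keeps only the start of the currently open segment and finalizes it when the next marker or the end of the data is reached, computing the marker key arithmetically and stripping 0xFF00 by zipping the segment with its tail.
import Mathlib
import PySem

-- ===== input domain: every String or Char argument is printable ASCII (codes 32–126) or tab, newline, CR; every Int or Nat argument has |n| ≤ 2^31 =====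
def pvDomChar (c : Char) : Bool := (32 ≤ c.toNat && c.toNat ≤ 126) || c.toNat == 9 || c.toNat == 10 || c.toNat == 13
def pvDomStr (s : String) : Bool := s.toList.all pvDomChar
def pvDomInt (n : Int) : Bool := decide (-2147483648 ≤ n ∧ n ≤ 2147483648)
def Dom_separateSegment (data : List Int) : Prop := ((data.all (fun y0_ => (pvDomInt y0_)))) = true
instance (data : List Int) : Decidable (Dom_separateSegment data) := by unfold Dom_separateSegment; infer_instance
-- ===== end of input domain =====

-- B replaces A's two-phase marker-index-list design by a single streaming pass that closes the
-- currently open segment at each new marker; objective: alternative (same cost, different algorithm).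

-- ===== PORT A =====
def remove0xFF00 (l : List Int) : List Int :=
  (PySem.List.pyRange 1 (l.length : Int) 1).foldl
    (fun acc i =>
      if PySem.List.pyGetD l i 0 = 0 then
        if PySem.List.pyGetD l (i - 1) 0 ≠ 255 then acc ++ [PySem.List.pyGetD l i 0] else acc
      else acc ++ [PySem.List.pyGetD l i 0])
    [PySem.List.pyGetD l 0 0]

def byteListToInt (l : List Int) : Int :=
  (PySem.List.pyRange 0 (l.length : Int) 1).foldl
    (fun res i => (res <<< (8 : Int)) + PySem.List.pyGetD l i 0) 0

def separateSegment (data : List Int) : List (Int × List (List Int)) :=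
  let n : Int := data.length
  let marker_pos : List Int :=
    (PySem.List.pyRange 1 n 1).foldl
      (fun mp i =>
        if PySem.List.pyGetD data (i - 1) 0 = 255 ∧ PySem.List.pyGetD data i 0 ≠ 0
        then mp ++ [i - 1] else mp) []
  let marker_pos := marker_pos ++ [n]
  let segments : PySem.Dict Int (List (List Int)) :=
    (PySem.List.pyRange 0 ((marker_pos.length : Int) - 1) 1).foldl
      (fun segments i =>
        let p := PySem.List.pyGetD marker_pos i 0
        let marker := byteListToInt (PySem.List.slice data (some p) (some (p + 2)))
        let segments := if segments.contains marker then segments else segments.insert marker []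
        segments.modify marker []
          (fun v => v ++ [remove0xFF00
            (PySem.List.slice data (some p) (some (PySem.List.pyGetD marker_pos (i + 1) 0)))]))
      PySem.Dict.empty
  segments.items

-- ===== PORT B =====
def closeSegment (segments : PySem.Dict Int (List (List Int))) (data : List Int)
    (start stop : Int) : PySem.Dict Int (List (List Int)) :=
  let key := PySem.List.pyGetD data start 0 * 256 + PySem.List.pyGetD data (start + 1) 0
  let seg := PySem.List.slice data (some start) (some stop)
  let cleaned := (seg.zip seg.tail).foldl
      (fun acc pc => if pc.2 ≠ 0 ∨ pc.1 ≠ 255 then acc ++ [pc.2] else acc)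
      [PySem.List.pyGetD seg 0 0]
  segments.insert key (segments.getD key [] ++ [cleaned])

def separateSegment_alt (data : List Int) : List (Int × List (List Int)) :=
  let n : Int := data.length
  let st := (PySem.List.pyRange 1 n 1).foldl
      (fun st i =>
        if PySem.List.pyGetD data (i - 1) 0 = 255 ∧ PySem.List.pyGetD data i 0 ≠ 0 then
          (if st.2 ≥ 0 then closeSegment st.1 data st.2 (i - 1) else st.1, i - 1)
        else st)
      (PySem.Dict.empty, -1)
  (if st.2 ≥ 0 then closeSegment st.1 data st.2 n else st.1).items

-- ===== PRECONDITION & SPEC =====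
-- Pre_ excludes exactly the inputs where A raises ValueError: a 0xFF followed by a non-zero
-- value outside 0..255 makes A's bytes() call fail.
def Pre_separateSegment (data : List Int) : Prop :=
  ∀ pc ∈ data.zip data.tail, pc.1 = 255 → pc.2 ≠ 0 → 0 ≤ pc.2 ∧ pc.2 ≤ 255
instance (data : List Int) : Decidable (Pre_separateSegment data) := by
  unfold Pre_separateSegment; infer_instance

def pvWitness_separateSegment : List Int := [255, 216, 255, 1, 255, 0, 2, 255, 255, 3]

def Spec_separateSegment (data : List Int) (out : List (Int × List (List Int))) : Prop :=
  out = separateSegment_alt data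
instance (data : List Int) (out : List (Int × List (List Int))) :
    Decidable (Spec_separateSegment data out) := by unfold Spec_separateSegment; infer_instance

-- ===== CLAIM (what is proved, stated in full; the proofs are below) =====
def Claim_equal_separateSegment : Prop :=
  ∀ (data : List Int), Dom_separateSegment data → Pre_separateSegment data →
    Spec_separateSegment data (separateSegment data)

-- ===== LEMMAS AND PROOFS =====

-- the marker condition tested by both programs at index i
abbrev pvCond (data : List Int) (i : Int) : Prop :=
  PySem.List.pyGetD data (i - 1) 0 = 255 ∧ PySem.List.pyGetD data i 0 ≠ 0

-- the list of marker positions (i-1 for each i in [1,n) passing the test)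
def pvMarkers (data : List Int) : List Int :=
  ((PySem.List.pyRange 1 (data.length : Int) 1).filter
    (fun i => decide (pvCond data i))).map (· - 1)

-- the body of A's second loop as a function of the two consecutive marker positions
def pvBodyA (data : List Int) (segments : PySem.Dict Int (List (List Int))) (p q : Int) :
    PySem.Dict Int (List (List Int)) :=
  let marker := byteListToInt (PySem.List.slice data (some p) (some (p + 2)))
  let segments := if segments.contains marker then segments else segments.insert marker []
  segments.modify marker
    [] (fun v => v ++ [remove0xFF00 (PySem.List.slice data (some p) (some q))])

def pvPairs (data : List Int) (d : PySem.Dict Int (List (List Int))) (l : List Int) :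
    PySem.Dict Int (List (List Int)) :=
  (l.zip l.tail).foldl (fun d pq => pvBodyA data d pq.1 pq.2) d

lemma pv_zip_get (l : List Int) (i : Int) (h0 : 0 ≤ i) (h : i + 1 < (l.length : Int)) :
    PySem.List.pyGetD (l.zip l.tail) i (0, 0) =
      (PySem.List.pyGetD l i 0, PySem.List.pyGetD l (i + 1) 0) := by
  obtain ⟨j, rfl⟩ := Int.eq_ofNat_of_zero_le h0
  have hj : j + 1 < l.length := by exact_mod_cast h
  have hz : j < (l.zip l.tail).length := by
    simp [List.length_zip]; omega
  have hc : (j : Int) + 1 = ((j + 1 : Nat) : Int) := by push_cast; ring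
  rw [hc, PySem.List.pyGetD_natCast, PySem.List.pyGetD_natCast, PySem.List.pyGetD_natCast]
  rw [List.getD_eq_getElem _ _ hz, List.getD_eq_getElem _ _ (by omega : j < l.length),
      List.getD_eq_getElem _ _ hj]
  rw [List.getElem_zip]
  simp [List.getElem_tail]

lemma pv_shift {σ : Type} (m : Int) (f : σ → Int → σ) (init : σ) :
    (PySem.List.pyRange 1 m 1).foldl f init =
      (PySem.List.pyRange 0 (m - 1) 1).foldl (fun s j => f s (j + 1)) init := by
  rw [PySem.List.pyRange_one, PySem.List.pyRange_one, List.foldl_map, List.foldl_map]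
  rw [show m - 1 - 0 = m - 1 by ring]
  apply PySem.List.foldl_congr_mem
  intro acc x _
  norm_num [add_comm]

lemma pv_remove_eq (l : List Int) :
    remove0xFF00 l = (l.zip l.tail).foldl
      (fun acc pc => if pc.2 ≠ 0 ∨ pc.1 ≠ 255 then acc ++ [pc.2] else acc)
      [PySem.List.pyGetD l 0 0] := by
  unfold remove0xFF00
  rcases l with _ | ⟨a, t⟩
  · simp [PySem.List.pyRange_one_eq_nil]
  · set l := a :: t with hl
    set z := l.zip l.tail with hzdef
    have hpos : 0 < l.length := by simp [hl]
    have hm : ((l.length : Int)) = ((z.length : Int)) + 1 := by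
      simp [hzdef, List.length_zip]
      omega
    have h1 : (PySem.List.pyRange 1 (l.length : Int) 1).foldl
        (fun acc i =>
          if PySem.List.pyGetD l i 0 = 0 then
            if PySem.List.pyGetD l (i - 1) 0 ≠ 255 then acc ++ [PySem.List.pyGetD l i 0] else acc
          else acc ++ [PySem.List.pyGetD l i 0])
        [PySem.List.pyGetD l 0 0]
      = (PySem.List.pyRange 1 (l.length : Int) 1).foldl
        (fun acc i =>
          if (PySem.List.pyGetD z (i - 1) (0, 0)).2 = 0 then
            if (PySem.List.pyGetD z (i - 1) (0, 0)).1 ≠ 255 then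
              acc ++ [(PySem.List.pyGetD z (i - 1) (0, 0)).2] else acc
          else acc ++ [(PySem.List.pyGetD z (i - 1) (0, 0)).2])
        [PySem.List.pyGetD l 0 0] := by
      apply PySem.List.foldl_congr_mem
      intro acc i hi
      rw [PySem.List.mem_pyRange_one] at hi
      rw [pv_zip_get l (i - 1) (by omega) (by omega)]
      simp
    rw [h1, pv_shift]
    have h2 : (PySem.List.pyRange 0 ((l.length : Int) - 1) 1).foldl
        (fun acc j =>
          if (PySem.List.pyGetD z (j + 1 - 1) (0, 0)).2 = 0 then
            if (PySem.List.pyGetD z (j + 1 - 1) (0, 0)).1 ≠ 255 then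
              acc ++ [(PySem.List.pyGetD z (j + 1 - 1) (0, 0)).2] else acc
          else acc ++ [(PySem.List.pyGetD z (j + 1 - 1) (0, 0)).2])
        [PySem.List.pyGetD l 0 0]
      = (PySem.List.pyRange 0 ((z.length : Int)) 1).foldl
        (fun acc j =>
          if (PySem.List.pyGetD z j (0, 0)).2 = 0 then
            if (PySem.List.pyGetD z j (0, 0)).1 ≠ 255 then
              acc ++ [(PySem.List.pyGetD z j (0, 0)).2] else acc
          else acc ++ [(PySem.List.pyGetD z j (0, 0)).2])
        [PySem.List.pyGetD l 0 0] := by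
      rw [show (l.length : Int) - 1 = ((z.length : Int)) by omega]
      apply PySem.List.foldl_congr_mem
      intro acc j _
      rw [show j + 1 - 1 = j by ring]
    rw [h2]
    rw [PySem.List.foldl_pyRange_zero_pyGetD' z ((0:Int), (0:Int))
      (fun acc (pc : Int × Int) =>
        if pc.2 = 0 then (if pc.1 ≠ 255 then acc ++ [pc.2] else acc) else acc ++ [pc.2])
      [PySem.List.pyGetD l 0 0]]
    apply PySem.List.foldl_congr_mem
    intro acc pc _
    by_cases hc2 : pc.2 = 0 <;> by_cases hc1 : pc.1 = 255 <;> simp [hc1, hc2]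

lemma pv_slice2 (data : List Int) (p : Int) (h0 : 0 ≤ p) (h : p + 1 < (data.length : Int)) :
    PySem.List.slice data (some p) (some (p + 2)) =
      [PySem.List.pyGetD data p 0, PySem.List.pyGetD data (p + 1) 0] := by
  obtain ⟨j, rfl⟩ := Int.eq_ofNat_of_zero_le h0
  have hj : j + 1 < data.length := by exact_mod_cast h
  rw [show ((j : Int) + 2) = ((j + 2 : Nat) : Int) by push_cast; ring,
      PySem.List.slice_natCast,
      show (j : Int) + 1 = ((j + 1 : Nat) : Int) by push_cast; ring,
      PySem.List.pyGetD_natCast, PySem.List.pyGetD_natCast]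
  rw [List.getD_eq_getElem _ _ (by omega : j < data.length), List.getD_eq_getElem _ _ hj]
  rw [show j + 2 - j = 2 by omega,
      show List.drop j data = data[j] :: data[j+1] :: List.drop (j+2) data by
        rw [List.drop_eq_getElem_cons (by omega), List.drop_eq_getElem_cons (by omega)]]
  rfl

lemma byteListToInt_eq (l : List Int) :
    byteListToInt l = l.foldl (fun res b => (res <<< (8 : Int)) + b) (0 : Int) := by
  unfold byteListToInt
  exact PySem.List.foldl_pyRange_zero_pyGetD' l (0 : Int)
    (fun (res : Int) (b : Int) => (res <<< (8 : Int)) + b) (0 : Int)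

lemma pv_body_eq (data : List Int) (p q : Int) (h0 : 0 ≤ p) (h1 : p + 1 < (data.length : Int))
    (h255 : PySem.List.pyGetD data p 0 = 255) (d : PySem.Dict Int (List (List Int))) :
    pvBodyA data d p q = closeSegment d data p q := by
  unfold pvBodyA closeSegment
  rw [pv_slice2 data p h0 h1, byteListToInt_eq]
  rw [show ([PySem.List.pyGetD data p 0, PySem.List.pyGetD data (p + 1) 0].foldl
      (fun res b => (res <<< (8 : Int)) + b) (0 : Int))
      = ((0 : Int) <<< (8 : Int) + PySem.List.pyGetD data p 0) <<< (8 : Int)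
        + PySem.List.pyGetD data (p + 1) 0 from rfl]
  rw [h255, show ((0 : Int) <<< (8 : Int) + 255) <<< (8 : Int) = 255 * 256 by decide]
  rw [pv_remove_eq (PySem.List.slice data (some p) (some q))]
  show ((if d.contains (255 * 256 + PySem.List.pyGetD data (p + 1) 0) then d
        else d.insert (255 * 256 + PySem.List.pyGetD data (p + 1) 0) []).insert
          (255 * 256 + PySem.List.pyGetD data (p + 1) 0)
          (((if d.contains (255 * 256 + PySem.List.pyGetD data (p + 1) 0) then d
             else d.insert (255 * 256 + PySem.List.pyGetD data (p + 1) 0) []).getD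
               (255 * 256 + PySem.List.pyGetD data (p + 1) 0) [])
            ++ [((PySem.List.slice data (some p) (some q)).zip
                  (PySem.List.slice data (some p) (some q)).tail).foldl
                (fun acc pc => if pc.2 ≠ 0 ∨ pc.1 ≠ 255 then acc ++ [pc.2] else acc)
                [PySem.List.pyGetD (PySem.List.slice data (some p) (some q)) 0 0]]))
      = d.insert (255 * 256 + PySem.List.pyGetD data (p + 1) 0)
          (d.getD (255 * 256 + PySem.List.pyGetD data (p + 1) 0) []
            ++ [((PySem.List.slice data (some p) (some q)).zip
                  (PySem.List.slice data (some p) (some q)).tail).foldl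
                (fun acc pc => if pc.2 ≠ 0 ∨ pc.1 ≠ 255 then acc ++ [pc.2] else acc)
                [PySem.List.pyGetD (PySem.List.slice data (some p) (some q)) 0 0]])
  set k := (255 : Int) * 256 + PySem.List.pyGetD data (p + 1) 0
  by_cases hc : d.contains k
  · simp [hc]
  · have hc2 : d.contains k = false := by simpa using hc
    simp [hc, PySem.Dict.insert_insert_self, PySem.Dict.getD_insert_self,
      PySem.Dict.getD_of_not_contains d [] hc2]

def pvStep (data : List Int) (st : PySem.Dict Int (List (List Int)) × Int) (p : Int) :
    PySem.Dict Int (List (List Int)) × Int :=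
  (if st.2 ≥ 0 then closeSegment st.1 data st.2 p else st.1, p)

lemma pv_markers_props (data : List Int) :
    ∀ p ∈ pvMarkers data,
      0 ≤ p ∧ p + 1 < (data.length : Int) ∧ PySem.List.pyGetD data p 0 = 255 := by
  intro p hp
  unfold pvMarkers at hp
  simp only [List.mem_map, List.mem_filter] at hp
  obtain ⟨i, ⟨hmem, hcond⟩, rfl⟩ := hp
  rw [PySem.List.mem_pyRange_one] at hmem
  have hc : pvCond data i := of_decide_eq_true hcond
  unfold pvCond at hc
  exact ⟨by omega, by omega, hc.1⟩

lemma pv_stream (data : List Int) (n : Int) :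
    ∀ (M : List Int),
      (∀ p ∈ M, 0 ≤ p ∧ p + 1 < (data.length : Int) ∧ PySem.List.pyGetD data p 0 = 255) →
      ∀ (d : PySem.Dict Int (List (List Int))) (s : Int), 0 ≤ s →
        s + 1 < (data.length : Int) → PySem.List.pyGetD data s 0 = 255 →
        (let r := M.foldl (pvStep data) (d, s)
         if r.2 ≥ 0 then closeSegment r.1 data r.2 n else r.1) =
          pvPairs data d ((s :: M) ++ [n]) := by
  intro M
  induction M with
  | nil =>
    intro _ d s hs0 hs1 hs255
    show (if s ≥ 0 then closeSegment d data s n else d) = _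
    rw [if_pos (by omega : s ≥ 0)]
    show _ = pvBodyA data d s n
    exact (pv_body_eq data s n hs0 hs1 hs255 d).symm
  | cons p rest ih =>
    intro hM d s hs0 hs1 hs255
    obtain ⟨hp0, hp1, hp255⟩ := hM p (by simp)
    have hrest := fun x hx => hM x (List.mem_cons_of_mem p hx)
    have hstep : pvStep data (d, s) p = (closeSegment d data s p, p) := by
      unfold pvStep
      rw [if_pos (by omega : ((d, s).2 : Int) ≥ 0)]
    show (if (((p :: rest).foldl (pvStep data) (d, s)).2 : Int) ≥ 0 then
            closeSegment ((p :: rest).foldl (pvStep data) (d, s)).1 data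
              ((p :: rest).foldl (pvStep data) (d, s)).2 n
          else ((p :: rest).foldl (pvStep data) (d, s)).1) = _
    rw [List.foldl_cons, hstep]
    rw [show (if ((rest.foldl (pvStep data) (closeSegment d data s p, p)).2 : Int) ≥ 0 then
            closeSegment (rest.foldl (pvStep data) (closeSegment d data s p, p)).1 data
              (rest.foldl (pvStep data) (closeSegment d data s p, p)).2 n
          else (rest.foldl (pvStep data) (closeSegment d data s p, p)).1)
        = pvPairs data (closeSegment d data s p) ((p :: rest) ++ [n])
      from ih hrest (closeSegment d data s p) p hp0 hp1 hp255]
    show pvPairs data (closeSegment d data s p) ((p :: rest) ++ [n]) = _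
    rw [← pv_body_eq data s p hs0 hs1 hs255 d]
    rfl

lemma pv_A_eq (data : List Int) :
    separateSegment data =
      (pvPairs data PySem.Dict.empty (pvMarkers data ++ [(data.length : Int)])).items := by
  unfold separateSegment
  simp only []
  have hA : (PySem.List.pyRange 1 (data.length : Int) 1).foldl
      (fun mp i =>
        if PySem.List.pyGetD data (i - 1) 0 = 255 ∧ PySem.List.pyGetD data i 0 ≠ 0
        then mp ++ [i - 1] else mp) ([] : List Int)
      = pvMarkers data := by
    unfold pvMarkers pvCond
    exact PySem.List.foldl_append_ite _ (fun i => i - 1) _ []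
  rw [hA]
  congr 1
  set mp := pvMarkers data ++ [(data.length : Int)] with hmp
  set z := mp.zip mp.tail with hz
  have hpos : 0 < mp.length := by simp [hmp]
  have hlen : (mp.length : Int) - 1 = ((z.length : Int)) := by
    simp [hz, List.length_zip]
    omega
  have h1 : (PySem.List.pyRange 0 ((mp.length : Int) - 1) 1).foldl
      (fun segments i =>
        pvBodyA data segments (PySem.List.pyGetD mp i 0) (PySem.List.pyGetD mp (i + 1) 0))
      PySem.Dict.empty
      = (PySem.List.pyRange 0 ((z.length : Int)) 1).foldl
      (fun segments i =>
        pvBodyA data segments (PySem.List.pyGetD z i (0, 0)).1 (PySem.List.pyGetD z i (0, 0)).2)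
      PySem.Dict.empty := by
    rw [hlen]
    apply PySem.List.foldl_congr_mem
    intro acc i hi
    rw [PySem.List.mem_pyRange_one] at hi
    rw [pv_zip_get mp i (by omega) (by omega)]
  have h2 := PySem.List.foldl_pyRange_zero_pyGetD' z ((0 : Int), (0 : Int))
      (fun segments (pq : Int × Int) => pvBodyA data segments pq.1 pq.2) PySem.Dict.empty
  show (PySem.List.pyRange 0 ((mp.length : Int) - 1) 1).foldl
        (fun segments i =>
          pvBodyA data segments (PySem.List.pyGetD mp i 0) (PySem.List.pyGetD mp (i + 1) 0))
        PySem.Dict.empty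
      = pvPairs data PySem.Dict.empty mp
  rw [h1, h2]
  rfl

lemma pv_B_eq (data : List Int) :
    separateSegment_alt data =
      (let r := (pvMarkers data).foldl (pvStep data) (PySem.Dict.empty, -1)
       if r.2 ≥ 0 then closeSegment r.1 data r.2 (data.length : Int) else r.1).items := by
  unfold separateSegment_alt
  simp only []
  have hfold : (PySem.List.pyRange 1 (data.length : Int) 1).foldl
      (fun st i =>
        if PySem.List.pyGetD data (i - 1) 0 = 255 ∧ PySem.List.pyGetD data i 0 ≠ 0 then
          (if st.2 ≥ 0 then closeSegment st.1 data st.2 (i - 1) else st.1, i - 1)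
        else st)
      ((PySem.Dict.empty : PySem.Dict Int (List (List Int))), (-1 : Int))
      = (pvMarkers data).foldl (pvStep data) (PySem.Dict.empty, -1) := by
    rw [PySem.List.foldl_ite_eq_foldl_filter
      (fun i => PySem.List.pyGetD data (i - 1) 0 = 255 ∧ PySem.List.pyGetD data i 0 ≠ 0)
      (fun st i =>
        (if st.2 ≥ 0 then closeSegment st.1 data st.2 (i - 1) else st.1, i - 1))
      (PySem.List.pyRange 1 (data.length : Int) 1) (PySem.Dict.empty, -1)]
    have hfilter : (PySem.List.pyRange 1 (data.length : Int) 1).filter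
        (fun i => decide (PySem.List.pyGetD data (i - 1) 0 = 255 ∧ PySem.List.pyGetD data i 0 ≠ 0))
        = (PySem.List.pyRange 1 (data.length : Int) 1).filter
          (fun i => decide (pvCond data i)) := by
      apply List.filter_congr
      intro i _
      unfold pvCond
      rfl
    rw [hfilter]
    unfold pvMarkers pvStep
    rw [List.foldl_map]
  rw [hfold]

theorem pv_main (data : List Int) : separateSegment data = separateSegment_alt data := by
  rw [pv_A_eq, pv_B_eq]
  cases hM : pvMarkers data with
  | nil =>
    show (pvPairs data PySem.Dict.empty ([] ++ [(data.length : Int)])).items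
      = (if ((-1 : Int) ≥ 0) then
          closeSegment PySem.Dict.empty data (-1) (data.length : Int)
        else PySem.Dict.empty).items
    rw [if_neg (by norm_num)]
    rfl
  | cons p rest =>
    have hprops := pv_markers_props data
    rw [hM] at hprops
    obtain ⟨hp0, hp1, hp255⟩ := hprops p List.mem_cons_self
    have hrest : ∀ x ∈ rest,
        0 ≤ x ∧ x + 1 < (data.length : Int) ∧ PySem.List.pyGetD data x 0 = 255 :=
      fun x hx => hprops x (List.mem_cons_of_mem p hx)
    show (pvPairs data PySem.Dict.empty ((p :: rest) ++ [(data.length : Int)])).items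
      = (if ((rest.foldl (pvStep data) (PySem.Dict.empty, p)).2 : Int) ≥ 0 then
          closeSegment (rest.foldl (pvStep data) (PySem.Dict.empty, p)).1 data
            (rest.foldl (pvStep data) (PySem.Dict.empty, p)).2 (data.length : Int)
        else (rest.foldl (pvStep data) (PySem.Dict.empty, p)).1).items
    congr 1
    exact (pv_stream data (data.length : Int) rest hrest PySem.Dict.empty p hp0 hp1 hp255).symm

-- ===== VERDICT (by name: the statement is the Claim_ definition above) =====
theorem separateSegment_spec : Claim_equal_separateSegment := by
  intro data _ _
  unfold Spec_separateSegment
  exact pv_main data
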